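-- pv_equiv track=rewrite | github.com/searsam1/theEdabitProject | Python/BMQTfsHiNJypyEXcn/code.py | primal_strength
-- ===== SOURCE A (Python) =====
-- def prime(n):
-- 	for i in range(2, n):
-- 		if not n % i:
-- 			return False
-- 	return True
--
-- def primal_strength(n):
-- 	n_minus, n_plus = n, n
-- 	lower, upper = 1, 1
-- 	n_minus -= 1
-- 	n_plus += 1
-- 	while not prime(n_minus):
-- 		n_minus -= 1
-- 		lower += 1
-- 	while not prime(n_plus):
-- 		n_plus += 1
-- 		upper += 1
-- 	return "Balanced" if lower == upper else ["Strong", "Weak"][lower < upper]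
-- ===== SOURCE B (Python) =====
-- def prime(n):
--     return all(n % i for i in range(2, n))
--
-- def primal_strength(n):
--     d = 1
--     while True:
--         below, above = prime(n - d), prime(n + d)
--         if below and above:
--             return "Balanced"
--         if below:
--             return "Weak"
--         if above:
--             return "Strong"
--         d += 1
-- ===== Notes on version B (the rewrite author's own statement) =====
-- stated objective: alternative
-- what changed: replaces A's two sequential one-sided scans (down to the nearest prime, then up) with a single symmetric outward search that tests n-d and n+d at the same growing distance d and decides from which side hits first
import Mathlib
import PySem

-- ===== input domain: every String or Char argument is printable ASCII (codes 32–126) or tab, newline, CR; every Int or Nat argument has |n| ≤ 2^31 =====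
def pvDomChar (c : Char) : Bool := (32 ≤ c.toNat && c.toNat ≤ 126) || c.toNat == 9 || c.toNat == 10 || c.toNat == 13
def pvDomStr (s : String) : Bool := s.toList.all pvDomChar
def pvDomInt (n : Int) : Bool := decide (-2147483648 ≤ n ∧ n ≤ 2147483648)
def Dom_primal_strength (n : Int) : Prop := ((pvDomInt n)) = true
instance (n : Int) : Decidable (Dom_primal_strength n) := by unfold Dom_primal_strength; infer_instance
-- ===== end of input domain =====

-- B replaces A's two sequential one-sided prime scans by one symmetric outward search
-- testing n-d and n+d at the same distance d (objective: alternative, same cost).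

-- ===== PORT A =====
-- prime(n): trial division over range(2, n); every value < 2 is vacuously "prime"
def primeA (n : Int) : Bool :=
  (PySem.List.pyRange 2 n 1).all (fun i => !(PySem.Int.mod n i == 0))

-- termination facts, cited by the ports' decreasing_by
theorem primeA_false_facts (m : Int) (h : primeA m = false) :
    3 ≤ m ∧ ¬ Nat.Prime m.toNat := by
  rw [primeA, List.all_eq_false] at h
  obtain ⟨i, hi, hmod⟩ := h
  rw [PySem.List.mem_pyRange_one] at hi
  have hmod' : PySem.Int.mod m i = 0 := by simpa using hmod
  have hdvd : i ∣ m := (PySem.Int.mod_eq_zero_iff_dvd m i).mp hmod'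
  refine ⟨by omega, fun hp => ?_⟩
  have hdvdN : i.toNat ∣ m.toNat := by
    have h1 : (i.toNat : Int) = i := Int.toNat_of_nonneg (by omega)
    have h2 : (m.toNat : Int) = m := Int.toNat_of_nonneg (by omega)
    rw [← Int.natCast_dvd_natCast, h1, h2]; exact hdvd
  rcases (Nat.Prime.eq_one_or_self_of_dvd hp _ hdvdN) with h' | h' <;> omega

-- smallest prime ≥ m, the up-loop's termination measure bound
def nextP (m : Int) : Nat := Nat.find (Nat.exists_infinite_primes m.toNat)

theorem upA_dec (m : Int) (h : primeA m = false) :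
    ((nextP (m + 1) : Int) - (m + 1)).toNat < ((nextP m : Int) - m).toNat := by
  obtain ⟨hm3, hnp⟩ := primeA_false_facts m h
  obtain ⟨hle, hpr⟩ := Nat.find_spec (Nat.exists_infinite_primes m.toNat)
  have hne : nextP m ≠ m.toNat := fun he => hnp (he ▸ hpr)
  have hgt : m.toNat + 1 ≤ nextP m := by
    have : m.toNat ≤ nextP m := hle
    omega
  have hmono : nextP (m + 1) ≤ nextP m :=
    Nat.find_min' (Nat.exists_infinite_primes (m + 1).toNat)
      ⟨by omega, hpr⟩
  omega

-- while not prime(n_minus): n_minus -= 1; lower += 1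
def downA (m l : Int) : Int × Int :=
  if primeA m then (m, l) else downA (m - 1) (l + 1)
termination_by m.toNat
decreasing_by
  have hf : primeA m = false := by simpa using ‹¬ primeA m = true›
  have := primeA_false_facts m hf
  omega

-- while not prime(n_plus): n_plus += 1; upper += 1
def upA (m u : Int) : Int × Int :=
  if primeA m then (m, u) else upA (m + 1) (u + 1)
termination_by ((nextP m : Int) - m).toNat
decreasing_by
  have hf : primeA m = false := by simpa using ‹¬ primeA m = true›
  exact upA_dec m hf

def primal_strength (n : Int) : String :=
  let n_minus := n - 1
  let n_plus := n + 1
  let lower := (downA n_minus 1).2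
  let upper := (upA n_plus 1).2
  -- ["Strong", "Weak"][lower < upper]: index 1 ("Weak") iff lower < upper
  if lower = upper then "Balanced"
  else if lower < upper then "Weak" else "Strong"

-- ===== PORT B =====
-- prime(n) = all(n % i for i in range(2, n))
def primeB (n : Int) : Bool :=
  (PySem.List.pyRange 2 n 1).all (fun i => !(PySem.Int.mod n i == 0))

-- while True: test both sides at distance d, else d += 1
def bLoop (n d : Int) : String :=
  let below := primeB (n - d)
  let above := primeB (n + d)
  if below && above then "Balanced"
  else if below then "Weak"
  else if above then "Strong"
  else bLoop n (d + 1)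
termination_by (n - 1 - d).toNat
decreasing_by
  have hf : primeB (n - d) = false := by simpa using ‹¬ primeB (n - d) = true›
  have := primeA_false_facts (n - d) hf
  omega

def primal_strength_alt (n : Int) : String := bLoop n 1

-- ===== PRECONDITION & SPEC =====
def Spec_primal_strength (n : Int) (out : String) : Prop := out = primal_strength_alt n
instance (n : Int) (out : String) : Decidable (Spec_primal_strength n out) := by unfold Spec_primal_strength; infer_instance

-- ===== CLAIM (what is proved, stated in full; the proofs are below) =====
def Claim_equal_primal_strength : Prop := ∀ (n : Int), Dom_primal_strength n → Spec_primal_strength n (primal_strength n)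

-- ===== LEMMAS AND PROOFS =====

theorem downA_snd_ge (m l : Int) : l ≤ (downA m l).2 := by
  fun_induction downA m l with
  | case1 => exact le_rfl
  | case2 m l h ih => omega

theorem upA_snd_ge (m u : Int) : u ≤ (upA m u).2 := by
  fun_induction upA m u with
  | case1 => exact le_rfl
  | case2 m u h ih => omega

-- B's outward loop at distance d agrees with A's verdict computed from the
-- one-sided scans resumed at distance d.
theorem bLoop_eq (n d : Int) :
    bLoop n d =
      (let L := (downA (n - d) d).2
       let U := (upA (n + d) d).2
       if L = U then "Balanced" else if L < U then "Weak" else "Strong") := by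
  fun_induction bLoop n d
  case case1 =>
    rename_i d below above h
    have h' : (primeA (n - d) && primeA (n + d)) = true := h
    rw [Bool.and_eq_true] at h'
    rw [downA, upA]
    simp [h'.1, h'.2]
  case case2 =>
    rename_i d below above hba hb
    have hb' : primeA (n - d) = true := hb
    have ha' : primeA (n + d) = false := by
      have h' : ¬(primeA (n - d) && primeA (n + d)) = true := hba
      simpa [hb'] using h'
    have hU : d + 1 ≤ (upA (n + d + 1) (d + 1)).2 := upA_snd_ge _ _
    have h1 : d ≠ (upA (n + d + 1) (d + 1)).2 := by omega
    have h2 : d < (upA (n + d + 1) (d + 1)).2 := by omega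
    rw [downA, upA]
    simp [hb', ha', h1, h2]
  case case3 =>
    rename_i d below above hba hb ha
    have hbx : ¬ primeA (n - d) = true := hb
    have hb' : primeA (n - d) = false := Bool.eq_false_iff.mpr hbx
    have ha' : primeA (n + d) = true := ha
    have hL : d + 1 ≤ (downA (n - d - 1) (d + 1)).2 := downA_snd_ge _ _
    have h1 : (downA (n - d - 1) (d + 1)).2 ≠ d := by omega
    have h2 : ¬ ((downA (n - d - 1) (d + 1)).2 < d) := by omega
    rw [downA, upA]
    simp [hb', ha', h1, h2]
  case case4 =>
    rename_i d below above hba hb ha ih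
    have hb' : primeA (n - d) = false := Bool.eq_false_iff.mpr hb
    have ha' : primeA (n + d) = false := Bool.eq_false_iff.mpr ha
    rw [ih]
    conv_rhs => rw [downA, upA]
    simp only [hb', ha', Bool.false_eq_true, if_false]
    have e1 : n - (d + 1) = n - d - 1 := by ring
    have e2 : n + (d + 1) = n + d + 1 := by ring
    rw [e1, e2]

-- ===== VERDICT (by name: the statement is the Claim_ definition above) =====
theorem primal_strength_spec : Claim_equal_primal_strength := by
  intro n _
  show primal_strength n = primal_strength_alt n
  rw [primal_strength_alt, bLoop_eq n 1, primal_strength]
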